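-- pv_equiv track=rewrite | github.com/khuushichand/aiml-project | tldw_Server_API/app/core/Character_Chat/modules/persona_exemplar_selector.py | _detect_request_categories
-- ===== SOURCE A (Python) =====
-- _REQUEST_CATEGORY_KEYWORDS: dict[str, set[str]] = {
--     "violence": {"kill", "attack", "fight", "hurt", "weapon", "assault", "injure", "harm"},
--     "self_harm": {"suicide", "self-harm", "selfharm", "overdose", "cutting"},
--     "sexual": {"sex", "sexual", "explicit", "nude", "porn"},
--     "illegal": {"illegal", "crime", "steal", "fraud", "hack", "exploit", "bypass"},
--     "medical": {"diagnose", "diagnosis", "medication", "dose", "treatment"},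
--     "financial": {"invest", "stocks", "options", "crypto", "tax", "trading"},
--     "political": {"election", "campaign", "vote", "policy", "government"},
-- }
--
-- def _tokenize(text: str) -> set[str]:
--     if not text:
--         return set()
--     tokens = {
--         token.strip(".,!?;:()[]{}\"'`).-_").lower()
--         for token in text.split()
--         if token.strip()
--     }
--     return {token for token in tokens if token}
--
-- def _detect_request_categories(user_turn: str) -> set[str]:
--     """Infer coarse request categories used for safety-blocked exemplar gating."""
--     lowered = str(user_turn or "").strip().lower()
--     if not lowered:
--         return set()
--     tokens = _tokenize(lowered)
--     categories: set[str] = set()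
--     for category, keywords in _REQUEST_CATEGORY_KEYWORDS.items():
--         if tokens.intersection(keywords):
--             categories.add(category)
--     return categories
-- ===== SOURCE B (Python) =====
-- _REQUEST_CATEGORY_KEYWORDS = {
--     "violence": ("kill", "attack", "fight", "hurt", "weapon", "assault", "injure", "harm"),
--     "self_harm": ("suicide", "self-harm", "selfharm", "overdose", "cutting"),
--     "sexual": ("sex", "sexual", "explicit", "nude", "porn"),
--     "illegal": ("illegal", "crime", "steal", "fraud", "hack", "exploit", "bypass"),
--     "medical": ("diagnose", "diagnosis", "medication", "dose", "treatment"),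
--     "financial": ("invest", "stocks", "options", "crypto", "tax", "trading"),
--     "political": ("election", "campaign", "vote", "policy", "government"),
-- }
--
-- # Reverse index, built once: each keyword maps to its (unique) category.
-- _KEYWORD_TO_CATEGORY = {
--     kw: cat
--     for cat, kws in _REQUEST_CATEGORY_KEYWORDS.items()
--     for kw in kws
-- }
--
--
-- def _tokenize(text):
--     if not text:
--         return set()
--     tokens = {
--         token.strip(".,!?;:()[]{}\"'`).-_").lower()
--         for token in text.split()
--         if token.strip()
--     }
--     return {token for token in tokens if token}
--
--
-- def _detect_request_categories(user_turn):
--     """Infer coarse request categories used for safety-blocked exemplar gating."""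
--     lowered = str(user_turn or "").strip().lower()
--     if not lowered:
--         return set()
--     tokens = _tokenize(lowered)
--     return {cat for kw, cat in _KEYWORD_TO_CATEGORY.items() if kw in tokens}
-- ===== Notes on version B (the rewrite author's own statement) =====
-- stated objective: alternative
-- what changed: Replaces the per-category set-intersection loop with a single pass over a precomputed keyword-to-category reverse index, testing each keyword's membership in the token set.
import Mathlib
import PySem

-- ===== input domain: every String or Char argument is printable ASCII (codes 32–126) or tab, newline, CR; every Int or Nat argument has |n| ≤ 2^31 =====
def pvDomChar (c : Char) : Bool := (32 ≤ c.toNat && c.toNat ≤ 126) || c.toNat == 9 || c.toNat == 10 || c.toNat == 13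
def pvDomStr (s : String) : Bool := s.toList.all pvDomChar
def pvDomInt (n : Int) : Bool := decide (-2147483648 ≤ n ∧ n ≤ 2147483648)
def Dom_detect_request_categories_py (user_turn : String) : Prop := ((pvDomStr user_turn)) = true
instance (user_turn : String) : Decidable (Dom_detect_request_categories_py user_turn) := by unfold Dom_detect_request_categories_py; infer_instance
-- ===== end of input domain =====

-- B replaces A's per-category set-intersection loop with one pass over a precomputed
-- keyword→category reverse index (alternative decomposition; same results).

-- ===== PORT A =====
-- the characters stripped from each token
def pvStripSet : String := ".,!?;:()[]{}\"'`).-_"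

-- _tokenize (shared verbatim by A and B in Python, so one shared helper here)
def pvTokenize (text : String) : PySem.Set String :=
  if text = "" then PySem.Set.empty
  else
    let tokens := (PySem.Str.split₀ text).foldl
      (fun s token =>
        if PySem.Str.strip token ≠ "" then
          PySem.Set.add s (PySem.Str.lower (PySem.Str.stripChars token pvStripSet))
        else s)
      PySem.Set.empty
    tokens.foldl (fun s t => if t ≠ "" then PySem.Set.add s t else s) PySem.Set.empty

-- _REQUEST_CATEGORY_KEYWORDS (dict of sets; each keyword list has distinct elements)
def pvCategoryKeywords : List (String × PySem.Set String) :=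
  [("violence", ["kill", "attack", "fight", "hurt", "weapon", "assault", "injure", "harm"]),
   ("self_harm", ["suicide", "self-harm", "selfharm", "overdose", "cutting"]),
   ("sexual", ["sex", "sexual", "explicit", "nude", "porn"]),
   ("illegal", ["illegal", "crime", "steal", "fraud", "hack", "exploit", "bypass"]),
   ("medical", ["diagnose", "diagnosis", "medication", "dose", "treatment"]),
   ("financial", ["invest", "stocks", "options", "crypto", "tax", "trading"]),
   ("political", ["election", "campaign", "vote", "policy", "government"])]

def detect_request_categories_py (user_turn : String) : List String :=
  let lowered := PySem.Str.lower (PySem.Str.strip (if user_turn = "" then "" else user_turn))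
  if lowered = "" then PySem.Set.empty
  else
    let tokens := pvTokenize lowered
    pvCategoryKeywords.foldl
      (fun cats p => if PySem.Set.inter tokens p.2 ≠ [] then PySem.Set.add cats p.1 else cats)
      PySem.Set.empty

-- ===== PORT B =====
-- _KEYWORD_TO_CATEGORY: the reverse index built once at module level (insertion order)
def pvKeywordToCategory : List (String × String) :=
  [("kill", "violence"), ("attack", "violence"), ("fight", "violence"), ("hurt", "violence"),
   ("weapon", "violence"), ("assault", "violence"), ("injure", "violence"), ("harm", "violence"),
   ("suicide", "self_harm"), ("self-harm", "self_harm"), ("selfharm", "self_harm"),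
   ("overdose", "self_harm"), ("cutting", "self_harm"),
   ("sex", "sexual"), ("sexual", "sexual"), ("explicit", "sexual"), ("nude", "sexual"),
   ("porn", "sexual"),
   ("illegal", "illegal"), ("crime", "illegal"), ("steal", "illegal"), ("fraud", "illegal"),
   ("hack", "illegal"), ("exploit", "illegal"), ("bypass", "illegal"),
   ("diagnose", "medical"), ("diagnosis", "medical"), ("medication", "medical"),
   ("dose", "medical"), ("treatment", "medical"),
   ("invest", "financial"), ("stocks", "financial"), ("options", "financial"),
   ("crypto", "financial"), ("tax", "financial"), ("trading", "financial"),
   ("election", "political"), ("campaign", "political"), ("vote", "political"),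
   ("policy", "political"), ("government", "political")]

def detect_request_categories_py_alt (user_turn : String) : List String :=
  let lowered := PySem.Str.lower (PySem.Str.strip (if user_turn = "" then "" else user_turn))
  if lowered = "" then PySem.Set.empty
  else
    let tokens := pvTokenize lowered
    pvKeywordToCategory.foldl
      (fun cats p => if PySem.Set.contains tokens p.1 then PySem.Set.add cats p.2 else cats)
      PySem.Set.empty

-- ===== PRECONDITION & SPEC =====
def Spec_detect_request_categories_py (user_turn : String) (out : List String) : Prop := out = detect_request_categories_py_alt user_turn
instance (user_turn : String) (out : List String) : Decidable (Spec_detect_request_categories_py user_turn out) := by unfold Spec_detect_request_categories_py; infer_instance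

-- ===== CLAIM (what is proved, stated in full; the proofs are below) =====
def Claim_equal_detect_request_categories_py : Prop := ∀ (user_turn : String), Dom_detect_request_categories_py user_turn → Spec_detect_request_categories_py user_turn (detect_request_categories_py user_turn)

-- ===== LEMMAS AND PROOFS =====

lemma pvAddIdem (s : PySem.Set String) (x : String) :
    PySem.Set.add (PySem.Set.add s x) x = PySem.Set.add s x := by
  rw [PySem.Set.add_eq_ite (s := PySem.Set.add s x)]
  simp [PySem.Set.mem_add]

lemma pvInterCond (tokens kws : List String) :
    (PySem.Set.inter tokens kws ≠ []) ↔ ∃ y, y ∈ tokens ∧ y ∈ kws := by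
  rw [Ne, List.eq_nil_iff_forall_not_mem]
  push Not
  constructor
  · rintro ⟨y, hy⟩; exact ⟨y, (PySem.Set.mem_inter _ _ _).1 hy⟩
  · rintro ⟨y, hy⟩; exact ⟨y, (PySem.Set.mem_inter _ _ _).2 hy⟩

-- one block of the reverse index (all pairs with the same category) behaves like
-- A's single intersection test for that category
lemma pvBlock (tokens : List String) (cat : String) (kws : List String) (cats : PySem.Set String) :
    (kws.map (fun k => (k, cat))).foldl
        (fun cats p => if PySem.Set.contains tokens p.1 then PySem.Set.add cats p.2 else cats) cats
      = if PySem.Set.inter tokens kws ≠ [] then PySem.Set.add cats cat else cats := by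
  induction kws generalizing cats with
  | nil =>
      simp [pvInterCond]
  | cons k rest ih =>
      simp only [List.map_cons, List.foldl_cons]
      by_cases hk : PySem.Set.contains tokens k = true
      · have hkmem : k ∈ tokens := (PySem.Set.contains_iff _ _).1 hk
        rw [if_pos hk, ih]
        have hcond : PySem.Set.inter tokens (k :: rest) ≠ [] := by
          rw [pvInterCond]; exact ⟨k, hkmem, List.mem_cons_self⟩
        rw [if_pos hcond]
        by_cases h : PySem.Set.inter tokens rest ≠ []
        · rw [if_pos h, pvAddIdem]
        · rw [if_neg h]
      · have hkmem : k ∉ tokens := fun h => hk ((PySem.Set.contains_iff _ _).2 h)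
        rw [if_neg hk, ih]
        have hcond : (PySem.Set.inter tokens (k :: rest) ≠ []) ↔ (PySem.Set.inter tokens rest ≠ []) := by
          rw [pvInterCond, pvInterCond]
          constructor
          · rintro ⟨y, hy, hyk⟩
            rcases List.mem_cons.1 hyk with rfl | hyr
            · exact absurd hy hkmem
            · exact ⟨y, hy, hyr⟩
          · rintro ⟨y, hy, hyr⟩; exact ⟨y, hy, List.mem_cons_of_mem _ hyr⟩
        by_cases h : PySem.Set.inter tokens rest ≠ []
        · rw [if_pos h, if_pos (hcond.2 h)]
        · rw [if_neg h, if_neg (fun hc => h (hcond.1 hc))]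

-- the whole reverse-index pass equals A's category loop, for any token set
lemma pvFolds (tokens : List String) :
    pvKeywordToCategory.foldl
        (fun cats p => if PySem.Set.contains tokens p.1 then PySem.Set.add cats p.2 else cats)
        PySem.Set.empty
      = pvCategoryKeywords.foldl
        (fun cats p => if PySem.Set.inter tokens p.2 ≠ [] then PySem.Set.add cats p.1 else cats)
        PySem.Set.empty := by
  have hsplit : pvKeywordToCategory =
      (["kill", "attack", "fight", "hurt", "weapon", "assault", "injure", "harm"].map (fun k => (k, "violence")))
      ++ (["suicide", "self-harm", "selfharm", "overdose", "cutting"].map (fun k => (k, "self_harm")))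
      ++ (["sex", "sexual", "explicit", "nude", "porn"].map (fun k => (k, "sexual")))
      ++ (["illegal", "crime", "steal", "fraud", "hack", "exploit", "bypass"].map (fun k => (k, "illegal")))
      ++ (["diagnose", "diagnosis", "medication", "dose", "treatment"].map (fun k => (k, "medical")))
      ++ (["invest", "stocks", "options", "crypto", "tax", "trading"].map (fun k => (k, "financial")))
      ++ (["election", "campaign", "vote", "policy", "government"].map (fun k => (k, "political"))) := rfl
  rw [hsplit]
  simp only [List.foldl_append, pvBlock, pvCategoryKeywords, List.foldl_cons, List.foldl_nil]

-- ===== VERDICT (by name: the statement is the Claim_ definition above) =====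
theorem detect_request_categories_py_spec : Claim_equal_detect_request_categories_py := by
  intro user_turn _
  unfold Spec_detect_request_categories_py detect_request_categories_py detect_request_categories_py_alt
  simp only []
  by_cases h : PySem.Str.lower (PySem.Str.strip (if user_turn = "" then "" else user_turn)) = ""
  · rw [if_pos h, if_pos h]
  · rw [if_neg h, if_neg h, pvFolds]
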